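-- pv_equiv track=rewrite | github.com/patriciomelor/Proyecto-plannit | src/status_encargado/views.py | tamano_grafico_2
-- ===== SOURCE A (Python) =====
-- def tamano_grafico_2(lista_grafico_uno):
--
--     # lista_grafico_uno = self.grafico_2()
--     maximo = 0
--     cont = 0
--
--     #Se obtiene el valor máximo del gráfico
--     for valores in lista_grafico_uno:
--         if cont == 0:
--             maximo = valores[1]
--             cont = 1
--         else:
--             if maximo < valores[1]:
--                 maximo = valores[1]
--
--     #Se verífica que el maximo sea divisible por 10, para el caso de un maximo superior a 20
--     division_exacta = 0
--     if maximo > 20: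
--         division_exacta = maximo % 10
--         while division_exacta != 0:
--             maximo = maximo + 1
--             division_exacta = maximo % 10
--     maximo = maximo + 1
--
--     return maximo
-- ===== SOURCE B (Python) =====
-- def tamano_grafico_2(lista_grafico_uno):
--     maximo = max((v[1] for v in lista_grafico_uno), default=0)
--     if maximo > 20:
--         maximo = -(-maximo // 10) * 10
--     return maximo + 1
-- ===== Notes on version B (the rewrite author's own statement) =====
-- stated objective: simpler
-- what changed: The manual first-element/compare loop becomes a one-pass max with a default, and the incrementing while-loop is replaced by closed-form ceiling division -(-maximo//10)*10.
import Mathlib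
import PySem

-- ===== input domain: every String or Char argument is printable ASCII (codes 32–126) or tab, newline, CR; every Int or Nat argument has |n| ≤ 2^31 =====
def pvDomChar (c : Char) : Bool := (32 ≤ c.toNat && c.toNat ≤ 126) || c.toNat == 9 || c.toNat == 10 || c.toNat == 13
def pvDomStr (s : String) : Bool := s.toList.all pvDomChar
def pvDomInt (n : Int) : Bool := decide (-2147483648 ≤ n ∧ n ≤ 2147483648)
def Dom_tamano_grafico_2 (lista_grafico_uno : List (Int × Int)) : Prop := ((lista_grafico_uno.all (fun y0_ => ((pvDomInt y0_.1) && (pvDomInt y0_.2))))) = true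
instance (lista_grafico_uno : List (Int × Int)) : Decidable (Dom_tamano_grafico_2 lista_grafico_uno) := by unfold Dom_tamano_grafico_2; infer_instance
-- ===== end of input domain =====

-- B replaces A's manual first-element/compare max loop by a single max fold and the
-- incrementing while-loop by closed-form ceiling division; objective: simpler.

-- ===== PORT A =====
-- A's while loop: increment maximo until maximo % 10 == 0.  Python's loop needs at
-- most 9 steps (maximo % 10 is in [0,10)); fuel 10 is a termination guard only and
-- is proved sufficient in tamanoRoundLoopA_eq below.
def tamanoRoundLoopA : Nat -> Int -> Int
  | 0, m => m
  | Nat.succ k, m => if PySem.Int.mod m 10 = 0 then m else tamanoRoundLoopA k (m + 1)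

def tamano_grafico_2 (lista_grafico_uno : List (Int × Int)) : Int :=
  -- the for-loop over (maximo, cont)
  let st := lista_grafico_uno.foldl
    (fun (st : Int × Int) valores =>
      if st.2 = 0 then (valores.2, 1)
      else if st.1 < valores.2 then (valores.2, st.2) else st)
    (0, 0)
  let maximo := st.1
  let maximo := if maximo > 20 then tamanoRoundLoopA 10 maximo else maximo
  maximo + 1

-- ===== PORT B =====
def tamano_grafico_2_alt (lista_grafico_uno : List (Int × Int)) : Int :=
  -- max((v[1] for v in lista_grafico_uno), default=0)
  let maximo :=
    match lista_grafico_uno with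
    | [] => 0
    | v :: rest => rest.foldl (fun a (p : Int × Int) => max a p.2) v.2
  let maximo := if maximo > 20 then -(PySem.Int.floordiv (-maximo) 10) * 10 else maximo
  maximo + 1

-- ===== PRECONDITION & SPEC =====
def Spec_tamano_grafico_2 (lista_grafico_uno : List (Int × Int)) (out : Int) : Prop := out = tamano_grafico_2_alt lista_grafico_uno
instance (lista_grafico_uno : List (Int × Int)) (out : Int) : Decidable (Spec_tamano_grafico_2 lista_grafico_uno out) := by unfold Spec_tamano_grafico_2; infer_instance

-- ===== CLAIM (what is proved, stated in full; the proofs are below) =====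
def Claim_equal_tamano_grafico_2 : Prop := ∀ (lista_grafico_uno : List (Int × Int)), Dom_tamano_grafico_2 lista_grafico_uno → Spec_tamano_grafico_2 lista_grafico_uno (tamano_grafico_2 lista_grafico_uno)

-- ===== LEMMAS AND PROOFS =====

-- Once cont = 1, A's fold is exactly the max fold.
theorem tamano_fold_eq (l : List (Int × Int)) (m : Int) :
    l.foldl (fun (st : Int × Int) valores =>
      if st.2 = 0 then (valores.2, 1)
      else if st.1 < valores.2 then (valores.2, st.2) else st) (m, 1)
    = (l.foldl (fun a (p : Int × Int) => max a p.2) m, 1) := by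
  induction l generalizing m with
  | nil => simp
  | cons v t ih =>
      simp only [List.foldl_cons]
      rw [show (if ((m, (1:Int)).2 = 0) then (v.2, (1:Int))
            else if (m, (1:Int)).1 < v.2 then (v.2, (m, (1:Int)).2) else (m, 1)) =
            ((max m v.2 : Int), (1:Int)) by
        simp only []
        split_ifs with h1 h2 <;> [omega; (simp; omega); (simp; omega)]]
      exact ih (max m v.2)

-- A's while loop computes ceiling division times 10; any fuel above the number of
-- remaining steps (at most 9) gives that value.
theorem tamanoRoundLoopA_eq (fuel : Nat) (m : Int) (hf : (10 - m % 10) % 10 < (fuel : Int)) :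
    tamanoRoundLoopA fuel m = -(PySem.Int.floordiv (-m) 10) * 10 := by
  induction fuel generalizing m with
  | zero => omega
  | succ k ih =>
      rw [tamanoRoundLoopA]
      split_ifs with h <;>
        rw [PySem.Int.mod_eq_emod_of_pos (by norm_num)] at h
      · rw [PySem.Int.floordiv_eq_ediv_of_pos (by norm_num)]
        omega
      · rw [ih (m + 1) (by omega)]
        rw [PySem.Int.floordiv_eq_ediv_of_pos (by norm_num),
            PySem.Int.floordiv_eq_ediv_of_pos (by norm_num)]
        omega

-- ===== VERDICT (by name: the statement is the Claim_ definition above) =====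
theorem tamano_grafico_2_spec : Claim_equal_tamano_grafico_2 := by
  intro l _
  unfold Spec_tamano_grafico_2 tamano_grafico_2 tamano_grafico_2_alt
  cases l with
  | nil => simp
  | cons v t =>
      simp only [List.foldl_cons, reduceIte, tamano_fold_eq]
      rw [tamanoRoundLoopA_eq 10 _ (by omega)]
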